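-- pv_equiv track=rewrite | github.com/jarelland-shouwa/sundrop | project.py | get_pos_in_square
-- ===== SOURCE A (Python) =====
-- TORCH_LEVEL_LIMIT: int = 3
--
-- def is_within(height: int, width: int, x: int, y: int) -> bool:
--     '''Checks if a position is within the boundaries of a 2D list.'''
--     return 0 <= y <= (height-1) and 0 <= x <= (width-1)
--
-- def get_pos_in_square(x: int, y: int,
--                                   list_height: int,
--                                   list_width: int,
--                                   torch_level: int) -> list[dict[str, int]]:
--     """Returns positions that are within a square of side 3
--     (adjusted by torch_level) as the (x,y) the centre.
--     I.e. positions that are within a Manhattan Distance of 2 units,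
--
--     Returns
--     -------
--     list[dict[str, int]]
--         valid_positions; E.g. [pos_dict_1, pos_dict_2, pos_dict_3, ...]
--     """
--
--     valid_positions: list[dict[str, int]] = []
--     # invalid_positions: list[dict[str, int]] = []
--     sq_range: range = sq_increment_range(torch_level)
--
--     for i in sq_range:
--         row_n: int = y + i
--         for j in sq_range:
--             col_n: int = x + j
--
--             if is_within(height=list_height, width=list_width, x=col_n, y=row_n):
--                 valid_positions.append({"x": col_n, "y": row_n})
--             # else:
--             #     invalid_positions.append({"x": col_n, "y": row_n})
--     return valid_positions
--
-- def sq_increment_range(torch_level_in: int) -> range: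
--     """Helps in finding the valid positions
--     from centre position in a square.
--     E.g. for torch_level_in = 1, i.e. side length = 3 units;
--     from centre (a, b),
--     with the returned range(-1, 2),
--     we can find all of the valid positions:
--     ```
--     for i in range(-1, 2):
--         for j in range(-1, 2):
--             valid_position = (a+i, b+j)
--     ```
--     Parameters
--     ----------
--     torch_level_in : int
--         Valid values = 1 to TORCH_LEVEL_LIMIT, all inclusive
--
--     Returns
--     -------
--     range
--         increment from centre position
--
--     Raises
--     ------
--     ValueError
--         Raised if side_length value is invalid.
--     """
--
--     if not(isinstance(torch_level_in, int) and 1 <= torch_level_in <= TORCH_LEVEL_LIMIT):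
--         raise ValueError("torch_level_in must be an int x, 1 <= x <= TORCH_LEVEL_LIMIT")
--     return range(0-torch_level_in, 1+torch_level_in)
-- ===== SOURCE B (Python) =====
-- TORCH_LEVEL_LIMIT: int = 3
--
--
-- def sq_increment_range(torch_level_in: int) -> range:
--     if not(isinstance(torch_level_in, int) and 1 <= torch_level_in <= TORCH_LEVEL_LIMIT):
--         raise ValueError("torch_level_in must be an int x, 1 <= x <= TORCH_LEVEL_LIMIT")
--     return range(0-torch_level_in, 1+torch_level_in)
--
--
-- def get_pos_in_square(x: int, y: int,
--                       list_height: int,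
--                       list_width: int,
--                       torch_level: int) -> list[dict[str, int]]:
--     """Clamp the square's window to the grid once, then emit every cell
--     of the intersection unconditionally (no per-cell bounds test)."""
--     sq_increment_range(torch_level)  # validates torch_level
--     t = torch_level
--     row_lo, row_hi = max(-t, -y), min(t, list_height - 1 - y)
--     col_lo, col_hi = max(-t, -x), min(t, list_width - 1 - x)
--     return [{"x": x + j, "y": y + i}
--             for i in range(row_lo, row_hi + 1)
--             for j in range(col_lo, col_hi + 1)]
-- ===== Notes on version B (the rewrite author's own statement) =====
-- stated objective: simpler
-- what changed: Instead of testing every cell of the (2t+1)^2 square with is_within, B clamps the row and column windows to the grid once and emits the intersection rectangle unconditionally.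
import Mathlib
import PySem

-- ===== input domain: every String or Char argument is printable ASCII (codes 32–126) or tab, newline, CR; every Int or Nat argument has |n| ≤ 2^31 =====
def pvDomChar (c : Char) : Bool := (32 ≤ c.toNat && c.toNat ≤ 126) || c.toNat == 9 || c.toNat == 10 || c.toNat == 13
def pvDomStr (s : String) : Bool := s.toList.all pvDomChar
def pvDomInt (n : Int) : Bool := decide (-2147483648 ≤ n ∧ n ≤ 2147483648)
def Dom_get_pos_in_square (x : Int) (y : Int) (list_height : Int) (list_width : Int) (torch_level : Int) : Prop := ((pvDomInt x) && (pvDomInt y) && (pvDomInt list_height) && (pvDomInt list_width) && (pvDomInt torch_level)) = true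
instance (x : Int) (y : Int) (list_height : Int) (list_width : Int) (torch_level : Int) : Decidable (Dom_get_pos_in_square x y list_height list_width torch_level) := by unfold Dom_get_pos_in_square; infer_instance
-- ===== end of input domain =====

-- B clamps the square's row/column windows to the grid once and emits the
-- intersection rectangle unconditionally, instead of testing every cell with is_within (objective: simpler).


-- ===== PORT A =====
def is_within (height : Int) (width : Int) (x : Int) (y : Int) : Bool :=
  (decide (0 ≤ y) && decide (y ≤ height - 1)) && (decide (0 ≤ x) && decide (x ≤ width - 1))

def get_pos_in_square (x : Int) (y : Int) (list_height : Int) (list_width : Int) (torch_level : Int) : List (List (String × Int)) :=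
  -- sq_range = sq_increment_range(torch_level) = range(0-t, 1+t); Pre_ excludes its ValueError
  let sq_range : List Int := PySem.List.pyRange (0 - torch_level) (1 + torch_level) 1
  sq_range.foldl (fun valid_positions i =>
    let row_n : Int := y + i
    sq_range.foldl (fun acc j =>
      let col_n : Int := x + j
      if is_within list_height list_width col_n row_n then
        acc ++ [[("x", col_n), ("y", row_n)]]
      else acc) valid_positions) []

-- ===== PORT B =====
def get_pos_in_square_alt (x : Int) (y : Int) (list_height : Int) (list_width : Int) (torch_level : Int) : List (List (String × Int)) :=
  let t := torch_level
  let row_lo := max (-t) (-y); let row_hi := min t (list_height - 1 - y)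
  let col_lo := max (-t) (-x); let col_hi := min t (list_width - 1 - x)
  (PySem.List.pyRange row_lo (row_hi + 1) 1).flatMap (fun i =>
    (PySem.List.pyRange col_lo (col_hi + 1) 1).map (fun j =>
      [("x", x + j), ("y", y + i)]))

-- ===== PRECONDITION & SPEC =====
-- Pre_: sq_increment_range raises ValueError unless 1 <= torch_level <= TORCH_LEVEL_LIMIT (= 3)
def Pre_get_pos_in_square (x : Int) (y : Int) (list_height : Int) (list_width : Int) (torch_level : Int) : Prop :=
  1 ≤ torch_level ∧ torch_level ≤ 3
instance (x : Int) (y : Int) (list_height : Int) (list_width : Int) (torch_level : Int) : Decidable (Pre_get_pos_in_square x y list_height list_width torch_level) := by unfold Pre_get_pos_in_square; infer_instance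

def pvWitness_get_pos_in_square : Int × Int × Int × Int × Int := (1, 0, 3, 4, 1)

def Spec_get_pos_in_square (x : Int) (y : Int) (list_height : Int) (list_width : Int) (torch_level : Int) (out : List (List (String × Int))) : Prop := out = get_pos_in_square_alt x y list_height list_width torch_level
instance (x : Int) (y : Int) (list_height : Int) (list_width : Int) (torch_level : Int) (out : List (List (String × Int))) : Decidable (Spec_get_pos_in_square x y list_height list_width torch_level out) := by unfold Spec_get_pos_in_square; infer_instance

-- ===== CLAIM (what is proved, stated in full; the proofs are below) =====
def Claim_equal_get_pos_in_square : Prop := ∀ (x : Int) (y : Int) (list_height : Int) (list_width : Int) (torch_level : Int), Dom_get_pos_in_square x y list_height list_width torch_level → Pre_get_pos_in_square x y list_height list_width torch_level → Spec_get_pos_in_square x y list_height list_width torch_level (get_pos_in_square x y list_height list_width torch_level)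

-- ===== LEMMAS AND PROOFS =====

-- filtering a unit-step range by an interval test yields the clamped range
theorem filter_pyRange_interval (a b lo hi : Int) :
    (PySem.List.pyRange a b 1).filter (fun v => decide (lo ≤ v) && decide (v ≤ hi)) =
      PySem.List.pyRange (max a lo) (min b (hi + 1)) 1 := by
  by_cases hab : b ≤ a
  · rw [PySem.List.pyRange_one_eq_nil hab, PySem.List.pyRange_one_eq_nil (by omega)]
    rfl
  · rw [not_le] at hab
    rw [PySem.List.pyRange_one_cons hab]
    have ih := filter_pyRange_interval (a + 1) b lo hi
    by_cases hin : lo ≤ a ∧ a ≤ hi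
    · have htrue : (decide (lo ≤ a) && decide (a ≤ hi)) = true := by
        simp [hin.1, hin.2]
      have h3 : a < min b (hi + 1) := by omega
      rw [List.filter_cons, htrue, if_pos rfl, ih,
        show max (a + 1) lo = a + 1 by omega, show max a lo = a by omega,
        PySem.List.pyRange_one_cons h3]
    · have hfalse : (decide (lo ≤ a) && decide (a ≤ hi)) = false := by
        rcases not_and_or.mp hin with h | h <;> simp [h]
      rw [List.filter_cons, hfalse, if_neg (by simp), ih]
      rcases not_and_or.mp hin with h | h
      · rw [show max (a + 1) lo = max a lo by omega]
      · rw [PySem.List.pyRange_one_eq_nil (by omega), PySem.List.pyRange_one_eq_nil (by omega)]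
termination_by (b - a).toNat
decreasing_by omega

theorem flatMap_if_eq_filter_flatMap {α β : Type} (l : List α) (p : α → Bool) (g : α → List β) :
    (l.flatMap fun i => if p i then g i else []) = (l.filter p).flatMap g := by
  induction l with
  | nil => rfl
  | cons a l ih =>
    by_cases h : p a <;> simp [List.flatMap_cons, h, ih]

theorem get_pos_in_square_spec : Claim_equal_get_pos_in_square := by
  intro x y h w t _ _
  unfold Spec_get_pos_in_square get_pos_in_square get_pos_in_square_alt is_within
  simp only [PySem.List.foldl_append_if, PySem.List.foldl_append_eq_flatMap, List.nil_append]
  -- rewrite each inner filtered row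
  have hrow : ∀ i : Int,
      ((PySem.List.pyRange (0 - t) (1 + t) 1).filter (fun j =>
          (decide (0 ≤ y + i) && decide (y + i ≤ h - 1)) &&
          (decide (0 ≤ x + j) && decide (x + j ≤ w - 1)))).map
        (fun j => [("x", x + j), ("y", y + i)]) =
      if (decide (0 ≤ y + i) && decide (y + i ≤ h - 1)) then
        (PySem.List.pyRange (max (-t) (-x)) (min t (w - 1 - x) + 1) 1).map
          (fun j => [("x", x + j), ("y", y + i)])
      else [] := by
    intro i
    by_cases hr : (decide (0 ≤ y + i) && decide (y + i ≤ h - 1)) = true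
    · rw [if_pos hr]
      congr 1
      rw [List.filter_congr (q := fun j => decide (-x ≤ j) && decide (j ≤ w - 1 - x))
          (by intro j _; rw [hr, Bool.true_and]; congr 1 <;>
              · rw [decide_eq_decide]; omega),
        filter_pyRange_interval]
      congr 1 <;> omega
    · rw [if_neg hr]
      have hf : (decide (0 ≤ y + i) && decide (y + i ≤ h - 1)) = false := Bool.eq_false_iff.mpr hr
      rw [List.filter_congr (q := fun _ => false) (by intro j _; rw [hf, Bool.false_and])]
      simp
  conv_lhs => rw [funext hrow]
  rw [flatMap_if_eq_filter_flatMap,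
    List.filter_congr (q := fun i => decide (-y ≤ i) && decide (i ≤ h - 1 - y))
      (by intro i _; congr 1 <;> · rw [decide_eq_decide]; omega),
    filter_pyRange_interval,
    show max (0 - t) (-y) = max (-t) (-y) by omega,
    show min (1 + t) (h - 1 - y + 1) = min t (h - 1 - y) + 1 by omega]
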